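-- pv_equiv track=rewrite | github.com/GritCoder/LeetCode | 第八周/0-1矩阵.py | solution
-- ===== SOURCE A (Python) =====
-- from collections import deque
--
-- def solution(matrix):
--     if not matrix:
--         return
--     row, col = len(matrix), len(matrix[0])
--     dist = [[0] * col for _ in range(row)]
--     zeros_pos = [(i, j) for i in range(row) for j in range(col) if matrix[i][j] == '.']
--     q = deque(zeros_pos)
--     seen = set(zeros_pos) # 养成一个好的思维习惯 只要跟深搜广搜相关的 一般都少不了标记数组
--     while q:
--         i, j = q.popleft()
--         for ni, nj in [(i-1, j), (i+1, j), (i, j-1), (i, j+1)]: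
--               # seen数组也是可以省去的，每次找的时候，可以通过判断dist[ni][nj] == 0 and matrix[ni][nj] == 1来筛选没有访问过的节点。
--             if 0 <= ni < row and 0 <= nj < col and (ni, nj) not in seen:
--                 dist[ni][nj] = dist[i][j] + 1
--                 q.append((ni, nj))
--                 seen.add((ni, nj))
--     return sum(max(dist))
-- ===== SOURCE B (Python) =====
-- def solution(matrix):
--     if not matrix:
--         return
--     row, col = len(matrix), len(matrix[0])
--     sources = [(i, j) for i in range(row) for j in range(col) if matrix[i][j] == '.']
--     dist = [[min((abs(i - si) + abs(j - sj) for si, sj in sources), default=0)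
--              for j in range(col)]
--             for i in range(row)]
--     return sum(max(dist))
-- ===== Notes on version B (the rewrite author's own statement) =====
-- stated objective: simpler
-- what changed: Replaces the multi-source BFS (deque + visited set + in-place distance updates) by the closed form: each cell's distance is the minimum Manhattan distance to any '.' cell (min over sources, default 0), computed directly in a nested comprehension; the empty-matrix guard and the sum(max(dist)) return are kept.
import Mathlib
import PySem

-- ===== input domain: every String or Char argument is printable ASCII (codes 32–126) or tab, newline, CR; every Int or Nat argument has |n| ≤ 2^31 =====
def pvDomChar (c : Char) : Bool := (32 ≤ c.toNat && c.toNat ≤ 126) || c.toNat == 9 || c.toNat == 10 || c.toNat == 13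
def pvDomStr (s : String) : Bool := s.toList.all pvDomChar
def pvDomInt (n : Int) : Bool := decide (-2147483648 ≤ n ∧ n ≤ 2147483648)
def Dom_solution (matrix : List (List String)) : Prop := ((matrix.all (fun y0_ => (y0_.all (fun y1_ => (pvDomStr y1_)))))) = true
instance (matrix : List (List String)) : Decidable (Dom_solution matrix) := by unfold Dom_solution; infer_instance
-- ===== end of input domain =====

-- B replaces A's multi-source BFS by the per-cell closed form "minimum Manhattan distance
-- to a source" (simpler: no queue/visited bookkeeping; not faster — O(R·C·S) vs A's O(R·C)).

-- ===== PORT A =====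
-- helpers shared by the two ports: both Pythons contain the identical source-collecting
-- comprehension and the identical 'sum(max(dist))' return expression.
def pvSources (matrix : List (List String)) (row col : Int) : List (Int × Int) :=
  (PySem.List.pyRange 0 row 1).flatMap (fun i =>
    ((PySem.List.pyRange 0 col 1).filter
        (fun j => (matrix.getD i.toNat []).getD j.toNat "" == ".")).map (fun j => (i, j)))

-- Python list '<' (lexicographic) on rows of ints, and max(dist) = first maximal row.
def pvLexLt : List Int → List Int → Bool
  | _, [] => false
  | [], _ :: _ => true
  | a :: as, b :: bs => if a < b then true else if b < a then false else pvLexLt as bs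

def pvMaxRow (l : List (List Int)) : List Int :=
  l.foldl (fun best x => if pvLexLt best x then x else best) l.headI

def pvGet2 (dist : List (List Int)) (i j : Int) : Int :=
  (dist.getD i.toNat []).getD j.toNat 0

def pvSet2 (dist : List (List Int)) (i j : Int) (v : Int) : List (List Int) :=
  dist.set i.toNat ((dist.getD i.toNat []).set j.toNat v)

def pvNbrs (c : Int × Int) : List (Int × Int) :=
  [(c.1 - 1, c.2), (c.1 + 1, c.2), (c.1, c.2 - 1), (c.1, c.2 + 1)]

def pvStep (row col : Int)
    (st : List (Int × Int) × PySem.Set (Int × Int) × List (List Int))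
    (c n : Int × Int) : List (Int × Int) × PySem.Set (Int × Int) × List (List Int) :=
  let q := st.1; let seen := st.2.1; let dist := st.2.2
  if 0 ≤ n.1 ∧ n.1 < row ∧ 0 ≤ n.2 ∧ n.2 < col ∧ ¬ n ∈ seen then
    (q ++ [n], PySem.Set.add seen n, pvSet2 dist n.1 n.2 (pvGet2 dist c.1 c.2 + 1))
  else (q, seen, dist)

-- the 'while q' loop; fuel = len(zeros_pos) + row*col strictly bounds the number of pops
def pvBfs (row col : Int) : Nat → List (Int × Int) → PySem.Set (Int × Int) →
    List (List Int) → List (List Int)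
  | 0, _, _, dist => dist
  | _ + 1, [], _, dist => dist
  | fuel + 1, c :: q, seen, dist =>
      let st := (pvNbrs c).foldl (fun st n => pvStep row col st c n) (q, seen, dist)
      pvBfs row col fuel st.1 st.2.1 st.2.2

def solution (matrix : List (List String)) : Option Int :=
  if matrix.length = 0 then none
  else
    let row : Int := matrix.length
    let col : Int := (matrix.headI).length
    let dist := List.replicate matrix.length (List.replicate (matrix.headI).length (0 : Int))
    let zeros := pvSources matrix row col
    let seen : PySem.Set (Int × Int) := PySem.Set.ofList zeros
    let final := pvBfs row col (zeros.length + matrix.length * (matrix.headI).length) zeros seen dist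
    some (pvMaxRow final).sum

-- ===== PORT B =====
def pvAbs (x : Int) : Int := if x < 0 then -x else x

def solution_alt (matrix : List (List String)) : Option Int :=
  if matrix.length = 0 then none
  else
    let row : Int := matrix.length
    let col : Int := (matrix.headI).length
    let sources := pvSources matrix row col
    let dist := (PySem.List.pyRange 0 row 1).map (fun i =>
      (PySem.List.pyRange 0 col 1).map (fun j =>
        PySem.List.minD (sources.map (fun s => pvAbs (i - s.1) + pvAbs (j - s.2)))
          (fun x => x) 0))
    some (pvMaxRow dist).sum

-- ===== PRECONDITION & SPEC =====
-- Pre_ excludes exactly the ragged inputs (a row shorter than the first row), on which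
-- the Python A raises IndexError at matrix[i][j].
def Pre_solution (matrix : List (List String)) : Prop :=
  ∀ r ∈ matrix, (matrix.headI).length ≤ r.length
instance (matrix : List (List String)) : Decidable (Pre_solution matrix) := by
  unfold Pre_solution; infer_instance

def pvWitness_solution : List (List String) := [[".", "#"], ["#", "#"]]

def Spec_solution (matrix : List (List String)) (out : Option Int) : Prop := out = solution_alt matrix
instance (matrix : List (List String)) (out : Option Int) : Decidable (Spec_solution matrix out) := by unfold Spec_solution; infer_instance

-- ===== CLAIM (what is proved, stated in full; the proofs are below) =====
def Claim_equal_solution : Prop := ∀ (matrix : List (List String)), Dom_solution matrix → Pre_solution matrix → Spec_solution matrix (solution matrix)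

-- ===== LEMMAS AND PROOFS =====

-- the spec distance: minimum Manhattan distance to a source (0 when there are none)
def pvD (S : List (Int × Int)) (c : Int × Int) : Int :=
  PySem.List.minD (S.map (fun s => pvAbs (c.1 - s.1) + pvAbs (c.2 - s.2))) (fun x => x) 0

def pvInG (row col : Int) (c : Int × Int) : Prop :=
  0 ≤ c.1 ∧ c.1 < row ∧ 0 ≤ c.2 ∧ c.2 < col

def pvGridIf (row col : Int) (S : List (Int × Int)) (seen : List (Int × Int)) : List (List Int) :=
  (List.range row.toNat).map (fun (i : Nat) => (List.range col.toNat).map (fun (j : Nat) =>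
    if ((i : Int), (j : Int)) ∈ seen then pvD S ((i : Int), (j : Int)) else 0))

def pvFinal (row col : Int) (S : List (Int × Int)) : List (List Int) :=
  (List.range row.toNat).map (fun (i : Nat) => (List.range col.toNat).map (fun (j : Nat) =>
    pvD S ((i : Int), (j : Int))))

def pvGridList (row col : Int) : List (Int × Int) :=
  (List.range row.toNat).flatMap (fun (i : Nat) => (List.range col.toNat).map (fun (j : Nat) => ((i : Int), (j : Int))))

def pvUcard (row col : Int) (seen : List (Int × Int)) : Nat :=
  ((pvGridList row col).filter (fun m => m ∉ seen)).length

-- Manhattan distance basic facts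
lemma pvAbs_nonneg (x : Int) : 0 ≤ pvAbs x := by
  unfold pvAbs; split_ifs <;> omega

lemma pvD_le (S : List (Int × Int)) (c s : Int × Int) (hs : s ∈ S) :
    pvD S c ≤ pvAbs (c.1 - s.1) + pvAbs (c.2 - s.2) := by
  exact PySem.List.minD_id_le _ _ _ (List.mem_map_of_mem hs)

lemma pvD_attained (S : List (Int × Int)) (c : Int × Int) (hne : S ≠ []) :
    ∃ s ∈ S, pvD S c = pvAbs (c.1 - s.1) + pvAbs (c.2 - s.2) := by
  have hmap : S.map (fun s => pvAbs (c.1 - s.1) + pvAbs (c.2 - s.2)) ≠ [] := by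
    simpa using hne
  have := PySem.List.minD_mem _ (fun x => x) 0 hmap
  rcases List.mem_map.mp this with ⟨s, hs, heq⟩
  exact ⟨s, hs, heq.symm⟩

lemma pvD_nonneg (S : List (Int × Int)) (c : Int × Int) (hne : S ≠ []) : 0 ≤ pvD S c := by
  rcases pvD_attained S c hne with ⟨s, _, heq⟩
  have h1 := pvAbs_nonneg (c.1 - s.1); have h2 := pvAbs_nonneg (c.2 - s.2)
  omega

lemma pvD_zero_iff (S : List (Int × Int)) (c : Int × Int) (hne : S ≠ []) :
    pvD S c = 0 ↔ c ∈ S := by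
  constructor
  · intro h
    rcases pvD_attained S c hne with ⟨s, hs, heq⟩
    have h1 := pvAbs_nonneg (c.1 - s.1); have h2 := pvAbs_nonneg (c.2 - s.2)
    have hc1 : c.1 = s.1 := by
      revert heq h; unfold pvAbs; split_ifs <;> omega
    have hc2 : c.2 = s.2 := by
      revert heq h; unfold pvAbs; split_ifs <;> omega
    have : c = s := Prod.ext hc1 hc2
    rwa [this]
  · intro h
    have hle := pvD_le S c c h
    have hge := pvD_nonneg S c hne
    have : pvAbs (c.1 - c.1) + pvAbs (c.2 - c.2) = 0 := by unfold pvAbs; split_ifs <;> omega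
    omega

lemma pvNbrs_symm (c n : Int × Int) : n ∈ pvNbrs c ↔ c ∈ pvNbrs n := by
  rcases c with ⟨a, b⟩; rcases n with ⟨x, y⟩
  simp [pvNbrs, Prod.ext_iff]
  omega

lemma pvD_lipschitz (S : List (Int × Int)) (c n : Int × Int) (hne : S ≠ [])
    (h : n ∈ pvNbrs c) : pvD S c ≤ pvD S n + 1 := by
  rcases pvD_attained S n hne with ⟨s, hs, heq⟩
  have hle := pvD_le S c s hs
  rcases c with ⟨a, b⟩; rcases n with ⟨x, y⟩
  simp only [pvNbrs, List.mem_cons, Prod.ext_iff, List.not_mem_nil,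
    or_false] at h
  rcases h with ⟨h1, h2⟩ | ⟨h1, h2⟩ | ⟨h1, h2⟩ | ⟨h1, h2⟩ <;> subst h1 <;> subst h2 <;>
    (revert hle heq; unfold pvAbs; split_ifs <;> (simp only [] at *; omega))

lemma pvD_descend (row col : Int) (S : List (Int × Int)) (c : Int × Int)
    (hg : ∀ s ∈ S, pvInG row col s) (hne : S ≠ []) (hc : pvInG row col c)
    (hpos : 0 < pvD S c) :
    ∃ n ∈ pvNbrs c, pvInG row col n ∧ pvD S n = pvD S c - 1 := by
  rcases pvD_attained S c hne with ⟨s, hs, heq⟩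
  have hsG := hg s hs
  -- choose the neighbour one step towards s
  have hkey : ∃ n ∈ pvNbrs c, pvInG row col n ∧
      pvAbs (n.1 - s.1) + pvAbs (n.2 - s.2) = pvD S c - 1 := by
    rcases c with ⟨a, b⟩; rcases s with ⟨x, y⟩
    unfold pvInG at hc hsG ⊢
    simp only [] at *
    by_cases h1 : a < x
    · refine ⟨(a + 1, b), by simp [pvNbrs], by simp only []; omega, ?_⟩
      revert heq; unfold pvAbs; split_ifs <;> (simp only [] at *; omega)
    · by_cases h2 : x < a
      · refine ⟨(a - 1, b), by simp [pvNbrs], by simp only []; omega, ?_⟩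
        revert heq; unfold pvAbs; split_ifs <;> (simp only [] at *; omega)
      · by_cases h3 : b < y
        · refine ⟨(a, b + 1), by simp [pvNbrs], by simp only []; omega, ?_⟩
          revert heq; unfold pvAbs; split_ifs <;> (simp only [] at *; omega)
        · by_cases h4 : y < b
          · refine ⟨(a, b - 1), by simp [pvNbrs], by simp only []; omega, ?_⟩
            revert heq; unfold pvAbs; split_ifs <;> (simp only [] at *; omega)
          · exfalso; revert heq; unfold pvAbs; split_ifs <;> (simp only [] at *; omega)
  rcases hkey with ⟨n, hnN, hnG, hnval⟩
  refine ⟨n, hnN, hnG, ?_⟩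
  have hub : pvD S n ≤ pvD S c - 1 := hnval ▸ pvD_le S n s hs
  have hlb := pvD_lipschitz S c n hne hnN
  omega

lemma pvD_noGap (row col : Int) (S : List (Int × Int)) (k : Int)
    (hg : ∀ s ∈ S, pvInG row col s) (hne : S ≠ []) (hk : 0 ≤ k)
    (h1 : ∀ c, pvInG row col c → pvD S c ≠ k + 1) :
    ∀ c, pvInG row col c → pvD S c ≤ k := by
  have key : ∀ (t : Nat) (c : Int × Int), pvInG row col c → pvD S c = k + 1 + t → False := by
    intro t
    induction t with
    | zero => intro c hc hval; exact h1 c hc (by omega)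
    | succ t ih =>
      intro c hc hval
      have hpos : 0 < pvD S c := by omega
      rcases pvD_descend row col S c hg hne hc hpos with ⟨n, _, hnG, hnval⟩
      exact ih n hnG (by omega)
  intro c hc
  by_contra h
  have hnn := pvD_nonneg S c hne
  exact key (pvD S c - k - 1).toNat c hc (by omega)

-- grid lemmas
lemma pvGet2_gridIf (row col : Int) (S seen : List (Int × Int)) (c : Int × Int)
    (hc : pvInG row col c) :
    pvGet2 (pvGridIf row col S seen) c.1 c.2 = if c ∈ seen then pvD S c else 0 := by
  obtain ⟨h1, h2, h3, h4⟩ := hc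
  have hi : c.1.toNat < row.toNat := by omega
  have hj : c.2.toNat < col.toNat := by omega
  have hcc : ((c.1.toNat : Int), (c.2.toNat : Int)) = c := by
    rw [Int.toNat_of_nonneg h1, Int.toNat_of_nonneg h3]
  unfold pvGet2
  have hrow : (pvGridIf row col S seen).getD c.1.toNat [] =
      (List.range col.toNat).map (fun (j : Nat) =>
        if ((c.1.toNat : Int), (j : Int)) ∈ seen then pvD S ((c.1.toNat : Int), (j : Int)) else 0) := by
    unfold pvGridIf
    rw [List.getD_eq_getElem _ _ (by simpa using hi), List.getElem_map, List.getElem_range]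
  rw [hrow, List.getD_eq_getElem _ _ (by simpa using hj), List.getElem_map, List.getElem_range,
    hcc]

lemma pvSet2_gridIf (row col : Int) (S seen : List (Int × Int)) (n : Int × Int)
    (hn : pvInG row col n) :
    pvSet2 (pvGridIf row col S seen) n.1 n.2 (pvD S n) = pvGridIf row col S (seen ++ [n]) := by
  obtain ⟨h1, h2, h3, h4⟩ := hn
  have hi : n.1.toNat < row.toNat := by omega
  have hj : n.2.toNat < col.toNat := by omega
  have hnn : ((n.1.toNat : Int), (n.2.toNat : Int)) = n := by
    rw [Int.toNat_of_nonneg h1, Int.toNat_of_nonneg h3]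
  unfold pvSet2
  have hrow : (pvGridIf row col S seen).getD n.1.toNat [] =
      (List.range col.toNat).map (fun (j : Nat) =>
        if ((n.1.toNat : Int), (j : Int)) ∈ seen then pvD S ((n.1.toNat : Int), (j : Int)) else 0) := by
    unfold pvGridIf
    rw [List.getD_eq_getElem _ _ (by simpa using hi), List.getElem_map, List.getElem_range]
  rw [hrow]
  unfold pvGridIf
  apply List.ext_getElem
  · simp
  intro i hL hR
  simp only [List.length_set, List.length_map, List.length_range] at hL
  simp only [List.getElem_set, List.getElem_map, List.getElem_range]
  by_cases hieq : n.1.toNat = i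
  · rw [if_pos hieq]
    subst hieq
    apply List.ext_getElem
    · simp
    intro j hjL hjR
    simp only [List.length_set, List.length_map, List.length_range] at hjL
    simp only [List.getElem_set, List.getElem_map, List.getElem_range]
    by_cases hjeq : n.2.toNat = j
    · rw [if_pos hjeq]
      subst hjeq
      rw [hnn, if_pos (List.mem_append_right _ (List.mem_singleton_self n))]
    · rw [if_neg hjeq]
      have hne : ((n.1.toNat : Int), (j : Int)) ≠ n := by
        intro h; rw [← hnn] at h
        have h2 := congrArg Prod.snd h; simp at h2; omega
      by_cases hmem : ((n.1.toNat : Int), (j : Int)) ∈ seen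
      · rw [if_pos hmem, if_pos (List.mem_append_left _ hmem)]
      · rw [if_neg hmem, if_neg (by
          intro h
          rcases List.mem_append.mp h with h | h
          · exact hmem h
          · exact hne (List.mem_singleton.mp h))]
  · rw [if_neg hieq]
    apply List.map_congr_left
    intro j hjmem
    have hne : ((i : Int), (j : Int)) ≠ n := by
      intro h; rw [← hnn] at h
      have h2 := congrArg Prod.fst h; simp at h2; omega
    by_cases hmem : ((i : Int), (j : Int)) ∈ seen
    · rw [if_pos hmem, if_pos (List.mem_append_left _ hmem)]
    · rw [if_neg hmem, if_neg (by
        intro h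
        rcases List.mem_append.mp h with h | h
        · exact hmem h
        · exact hne (List.mem_singleton.mp h))]

lemma pvGridIf_final (row col : Int) (S seen : List (Int × Int))
    (h : ∀ m, pvInG row col m → m ∈ seen) :
    pvGridIf row col S seen = pvFinal row col S := by
  unfold pvGridIf pvFinal
  apply List.map_congr_left
  intro i hi
  apply List.map_congr_left
  intro j hj
  rw [List.mem_range] at hi hj
  have : pvInG row col ((i : Int), (j : Int)) := by
    unfold pvInG; constructor; · positivity
    refine ⟨by omega, by positivity, by omega⟩
  rw [if_pos (h _ this)]

lemma pvMem_gridList (row col : Int) (m : Int × Int) :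
    m ∈ pvGridList row col ↔ pvInG row col m := by
  unfold pvGridList pvInG
  simp only [List.mem_flatMap, List.mem_map, List.mem_range]
  constructor
  · rintro ⟨i, hi, j, hj, rfl⟩
    simp only []
    refine ⟨by positivity, by omega, by positivity, by omega⟩
  · rintro ⟨h1, h2, h3, h4⟩
    refine ⟨m.1.toNat, by omega, m.2.toNat, by omega, ?_⟩
    rw [Int.toNat_of_nonneg h1, Int.toNat_of_nonneg h3]

lemma pvNodup_gridList (row col : Int) : (pvGridList row col).Nodup := by
  unfold pvGridList
  rw [List.nodup_flatMap]
  constructor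
  · intro i _
    exact (List.nodup_range).map (fun a b h => by
      have h2 := congrArg Prod.snd h; simp at h2; omega)
  · apply List.Pairwise.imp (fun {i j} (hij : i < j) => ?_) (List.pairwise_lt_range)
    rw [Function.onFun, List.disjoint_left]
    rintro m hm hm'
    rcases List.mem_map.mp hm with ⟨a, _, rfl⟩
    rcases List.mem_map.mp hm' with ⟨b, _, hb⟩
    have h2 := congrArg Prod.fst hb; simp at h2; omega

lemma pvFilter_notmem_append_one (L : List (Int × Int)) (seen : List (Int × Int))
    (a : Int × Int) (hnd : L.Nodup) (haL : a ∈ L) (hfresh : a ∉ seen) :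
    (L.filter (fun m => m ∉ seen ++ [a])).length + 1 = (L.filter (fun m => m ∉ seen)).length := by
  induction L with
  | nil => cases haL
  | cons x t ih =>
    have hxt : x ∉ t := (List.nodup_cons.mp hnd).1
    have hndt : t.Nodup := (List.nodup_cons.mp hnd).2
    by_cases hxa : x = a
    · subst hxa
      have hat : x ∉ t := hxt
      have heqf : t.filter (fun m => m ∉ seen ++ [x]) = t.filter (fun m => m ∉ seen) := by
        apply List.filter_congr
        intro m hm
        have hma : m ≠ x := by rintro rfl; exact hat hm
        simp [List.mem_append, hma]
      simp only [List.filter_cons]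
      rw [if_neg (by simp), if_pos (by simpa using hfresh), heqf]
      simp
    · have hat : a ∈ t := by
        rcases List.mem_cons.mp haL with h | h
        · exact absurd h.symm hxa
        · exact h
      by_cases hxs : x ∈ seen
      · simp only [List.filter_cons]
        rw [if_neg (by simp [hxs]), if_neg (by simpa using hxs)]
        exact ih hndt hat
      · simp only [List.filter_cons]
        rw [if_pos (by simp [hxs, hxa]), if_pos (by simpa using hxs)]
        simp only [List.length_cons]
        have := ih hndt hat
        omega

lemma pvUcard_append_one (row col : Int) (seen : List (Int × Int)) (a : Int × Int)
    (ha : pvInG row col a) (hfresh : a ∉ seen) :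
    pvUcard row col (seen ++ [a]) + 1 = pvUcard row col seen := by
  unfold pvUcard
  exact pvFilter_notmem_append_one _ seen a (pvNodup_gridList row col)
    ((pvMem_gridList row col a).mpr ha) hfresh

lemma pvUcard_le (row col : Int) (seen : List (Int × Int)) :
    pvUcard row col seen ≤ row.toNat * col.toNat := by
  have h1 : pvUcard row col seen ≤ (pvGridList row col).length := List.length_filter_le _ _
  have h2 : (pvGridList row col).length = row.toNat * col.toNat := by
    unfold pvGridList
    rw [List.length_flatMap]
    simp
  omega

-- the BFS invariant
structure pvInv (row col : Int) (S : List (Int × Int)) (k : Int)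
    (T C : List (Int × Int)) (seen : PySem.Set (Int × Int))
    (dist : List (List Int)) : Prop where
  hg : ∀ s ∈ S, pvInG row col s
  hne : S ≠ []
  hk : 0 ≤ k
  tmem : ∀ m ∈ T, pvInG row col m ∧ pvD S m = k
  cmem : ∀ m ∈ C, pvInG row col m ∧ pvD S m = k + 1
  cov : ∀ n, pvInG row col n → pvD S n = k + 1 → (∃ p ∈ T, n ∈ pvNbrs p) ∨ n ∈ C
  schar : ∀ m, m ∈ seen ↔ (pvInG row col m ∧ (pvD S m ≤ k ∨ m ∈ C))
  dchar : dist = pvGridIf row col S seen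

lemma pvInv_switch {row col : Int} {S : List (Int × Int)} {k : Int}
    {C : List (Int × Int)} {seen : PySem.Set (Int × Int)} {dist : List (List Int)}
    (h : pvInv row col S k [] C seen dist) : pvInv row col S (k + 1) C [] seen dist := by
  obtain ⟨hg, hne, hk, tmem, cmem, cov, schar, dchar⟩ := h
  have hC : ∀ n, pvInG row col n → pvD S n = k + 1 → n ∈ C := by
    intro n hnG hval
    rcases cov n hnG hval with ⟨p, hp, _⟩ | h2
    · exact (List.not_mem_nil hp).elim
    · exact h2
  refine ⟨hg, hne, by omega, cmem, by simp, ?_, ?_, dchar⟩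
  · intro n hnG hval
    left
    have hpos : 0 < pvD S n := by omega
    obtain ⟨p, hpN, hpG, hpval⟩ := pvD_descend row col S n hg hne hnG hpos
    have hpC : p ∈ C := hC p hpG (by omega)
    exact ⟨p, hpC, (pvNbrs_symm n p).mp hpN⟩
  · intro m
    rw [schar m]
    constructor
    · rintro ⟨hG, hle | hmC⟩
      · exact ⟨hG, Or.inl (by omega)⟩
      · exact ⟨hG, Or.inl (by have := (cmem m hmC).2; omega)⟩
    · rintro ⟨hG, hle | hmC⟩
      · by_cases hcase : pvD S m ≤ k
        · exact ⟨hG, Or.inl hcase⟩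
        · exact ⟨hG, Or.inr (hC m hG (by omega))⟩
      · exact (List.not_mem_nil hmC).elim

lemma pvInv_terminal {row col : Int} {S : List (Int × Int)} {k : Int}
    {seen : PySem.Set (Int × Int)} {dist : List (List Int)}
    (h : pvInv row col S k [] [] seen dist) : dist = pvFinal row col S := by
  obtain ⟨hg, hne, hk, tmem, cmem, cov, schar, dchar⟩ := h
  have hnolvl : ∀ c, pvInG row col c → pvD S c ≠ k + 1 := by
    intro c hc hval
    rcases cov c hc hval with ⟨p, hp, _⟩ | h2
    · exact (List.not_mem_nil hp).elim
    · exact (List.not_mem_nil h2).elim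
  have hall := pvD_noGap row col S k hg hne hk hnolvl
  rw [dchar]
  exact pvGridIf_final row col S seen (fun m hm => (schar m).mpr ⟨hm, Or.inl (hall m hm)⟩)

-- the inner fold over the four neighbours of a popped cell
lemma pvFold_nbrs {row col : Int} {S : List (Int × Int)} {k : Int} (c : Int × Int)
    (_hgS : ∀ s ∈ S, pvInG row col s) (hneS : S ≠ [])
    (hcG : pvInG row col c) (hck : pvD S c = k) :
    ∀ (ns : List (Int × Int)), (∀ n ∈ ns, n ∈ pvNbrs c) →
    ∀ (q : List (Int × Int)) (seen : PySem.Set (Int × Int)) (dist : List (List Int))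
      (C : List (Int × Int)),
      (∀ m, m ∈ seen ↔ (pvInG row col m ∧ (pvD S m ≤ k ∨ m ∈ C))) →
      (∀ m ∈ C, pvInG row col m ∧ pvD S m = k + 1) →
      dist = pvGridIf row col S seen → c ∈ seen →
      ∃ ks, ns.foldl (fun st n => pvStep row col st c n) (q, seen, dist)
              = (q ++ ks, seen ++ ks, pvGridIf row col S (seen ++ ks))
        ∧ (∀ m ∈ ks, pvInG row col m ∧ pvD S m = k + 1 ∧ m ∉ seen)
        ∧ ks.Nodup
        ∧ (∀ n ∈ ns, pvInG row col n → pvD S n = k + 1 → (n ∈ seen ∨ n ∈ ks)) := by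
  intro ns
  induction ns with
  | nil =>
    intro _ q seen dist C hschar hcmem hdist hcseen
    refine ⟨[], by simp [hdist], by simp, by simp, by simp⟩
  | cons n ns' ih =>
    intro hns q seen dist C hschar hcmem hdist hcseen
    have hnNbr : n ∈ pvNbrs c := hns n List.mem_cons_self
    by_cases hcond : pvInG row col n ∧ n ∉ seen
    · obtain ⟨hnG, hfresh⟩ := hcond
      have hdn : pvD S n = k + 1 := by
        have hnot : ¬ (pvD S n ≤ k ∨ n ∈ C) := fun hh => hfresh ((hschar n).mpr ⟨hnG, hh⟩)
        have hgt : k < pvD S n := by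
          by_contra hle
          exact hnot (Or.inl (by omega))
        have hub := pvD_lipschitz S n c hneS ((pvNbrs_symm c n).mp hnNbr)
        omega
      have hstep : pvStep row col (q, seen, dist) c n
          = (q ++ [n], seen ++ [n], pvGridIf row col S (seen ++ [n])) := by
        unfold pvStep
        rw [if_pos ⟨hnG.1, hnG.2.1, hnG.2.2.1, hnG.2.2.2, hfresh⟩]
        dsimp only
        have hv : pvGet2 dist c.1 c.2 + 1 = pvD S n := by
          rw [hdist, pvGet2_gridIf row col S seen c hcG, if_pos hcseen, hck, hdn]
        rw [PySem.Set.add_of_not_mem hfresh, hv, hdist, pvSet2_gridIf row col S seen n hnG]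
      have hschar' : ∀ m, m ∈ seen ++ [n] ↔
          (pvInG row col m ∧ (pvD S m ≤ k ∨ m ∈ C ++ [n])) := by
        intro m
        constructor
        · intro hm
          rcases List.mem_append.mp hm with hm | hm
          · obtain ⟨hG, hh⟩ := (hschar m).mp hm
            exact ⟨hG, hh.imp id (List.mem_append_left _)⟩
          · rcases List.mem_singleton.mp hm with rfl
            exact ⟨hnG, Or.inr (List.mem_append_right _ (List.mem_singleton_self _))⟩
        · rintro ⟨hG, hle | hmC⟩
          · exact List.mem_append_left _ ((hschar m).mpr ⟨hG, Or.inl hle⟩)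
          · rcases List.mem_append.mp hmC with hmC | hmC
            · exact List.mem_append_left _ ((hschar m).mpr ⟨hG, Or.inr hmC⟩)
            · exact List.mem_append_right _ hmC
      have hcmem' : ∀ m ∈ C ++ [n], pvInG row col m ∧ pvD S m = k + 1 := by
        intro m hm
        rcases List.mem_append.mp hm with hm | hm
        · exact hcmem m hm
        · rcases List.mem_singleton.mp hm with rfl
          exact ⟨hnG, hdn⟩
      obtain ⟨ks, hfold, hksmem, hksnd, hcover⟩ :=
        ih (fun m hm => hns m (List.mem_cons_of_mem n hm)) (q ++ [n]) (seen ++ [n])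
          (pvGridIf row col S (seen ++ [n])) (C ++ [n]) hschar' hcmem' rfl
          (List.mem_append_left _ hcseen)
      refine ⟨n :: ks, ?_, ?_, ?_, ?_⟩
      · rw [List.foldl_cons, hstep, hfold]
        simp
      · intro m hm
        rcases List.mem_cons.mp hm with rfl | hm
        · exact ⟨hnG, hdn, hfresh⟩
        · obtain ⟨hG, hval, hnm⟩ := hksmem m hm
          exact ⟨hG, hval, fun hmem => hnm (List.mem_append_left _ hmem)⟩
      · rw [List.nodup_cons]
        refine ⟨fun hmem => ?_, hksnd⟩
        exact (hksmem n hmem).2.2 (List.mem_append_right _ (List.mem_singleton_self _))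
      · intro m hm hG hval
        rcases List.mem_cons.mp hm with rfl | hm
        · exact Or.inr List.mem_cons_self
        · rcases hcover m hm hG hval with hmem | hmem
          · rcases List.mem_append.mp hmem with hmem | hmem
            · exact Or.inl hmem
            · exact Or.inr (List.mem_cons.mpr (Or.inl (List.mem_singleton.mp hmem)))
          · exact Or.inr (List.mem_cons_of_mem n hmem)
    · have hstep : pvStep row col (q, seen, dist) c n = (q, seen, dist) := by
        unfold pvStep
        rw [if_neg (by
          intro hh
          exact hcond ⟨⟨hh.1, hh.2.1, hh.2.2.1, hh.2.2.2.1⟩, hh.2.2.2.2⟩)]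
      obtain ⟨ks, hfold, hksmem, hksnd, hcover⟩ :=
        ih (fun m hm => hns m (List.mem_cons_of_mem n hm)) q seen dist C hschar hcmem hdist
          hcseen
      refine ⟨ks, by rw [List.foldl_cons, hstep, hfold], hksmem, hksnd, ?_⟩
      intro m hm hG hval
      rcases List.mem_cons.mp hm with rfl | hm
      · by_cases hmem : m ∈ seen
        · exact Or.inl hmem
        · exact absurd ⟨hG, hmem⟩ hcond
      · exact hcover m hm hG hval

lemma pvUcard_append (row col : Int) (seen ks : List (Int × Int))
    (h : ∀ m ∈ ks, pvInG row col m ∧ m ∉ seen) (hnd : ks.Nodup) :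
    pvUcard row col (seen ++ ks) + ks.length = pvUcard row col seen := by
  induction ks generalizing seen with
  | nil => simp
  | cons a t ih =>
    have ha := h a List.mem_cons_self
    have h1 : pvUcard row col (seen ++ [a]) + 1 = pvUcard row col seen :=
      pvUcard_append_one row col seen a ha.1 ha.2
    have h2 : pvUcard row col ((seen ++ [a]) ++ t) + t.length = pvUcard row col (seen ++ [a]) := by
      apply ih
      · intro m hm
        have hm' := h m (List.mem_cons_of_mem a hm)
        refine ⟨hm'.1, fun hmem => ?_⟩
        rcases List.mem_append.mp hmem with hmem | hmem
        · exact hm'.2 hmem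
        · rcases List.mem_singleton.mp hmem with rfl
          exact (List.nodup_cons.mp hnd).1 hm
      · exact (List.nodup_cons.mp hnd).2
    rw [← List.append_cons] at h2
    simp only [List.length_cons]
    omega

lemma pvBfs_cons (row col : Int) (fuel : Nat) (c : Int × Int) (q : List (Int × Int))
    (seen : PySem.Set (Int × Int)) (dist : List (List Int)) :
    pvBfs row col (fuel + 1) (c :: q) seen dist =
      pvBfs row col fuel
        ((pvNbrs c).foldl (fun st n => pvStep row col st c n) (q, seen, dist)).1
        ((pvNbrs c).foldl (fun st n => pvStep row col st c n) (q, seen, dist)).2.1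
        ((pvNbrs c).foldl (fun st n => pvStep row col st c n) (q, seen, dist)).2.2 := rfl

-- one step of the while loop, assuming the head of the queue is in the current layer
lemma pvBfs_step {row col : Int} {S : List (Int × Int)} (fuel : Nat)
    (IH : ∀ (k : Int) (T C : List (Int × Int)) (seen : PySem.Set (Int × Int))
        (dist : List (List Int)), pvInv row col S k T C seen dist →
        (T ++ C).length + pvUcard row col seen ≤ fuel →
        pvBfs row col fuel (T ++ C) seen dist = pvFinal row col S)
    (k : Int) (c : Int × Int) (T C : List (Int × Int)) (seen : PySem.Set (Int × Int))
    (dist : List (List Int))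
    (hinv : pvInv row col S k (c :: T) C seen dist)
    (hfuel : ((c :: T) ++ C).length + pvUcard row col seen ≤ fuel + 1) :
    pvBfs row col (fuel + 1) ((c :: T) ++ C) seen dist = pvFinal row col S := by
  obtain ⟨hg, hne, hk, tmem, cmem, cov, schar, dchar⟩ := hinv
  have hcG := (tmem c List.mem_cons_self).1
  have hck := (tmem c List.mem_cons_self).2
  have hcseen : c ∈ seen := (schar c).mpr ⟨hcG, Or.inl (le_of_eq hck)⟩
  obtain ⟨ks, hfold, hksmem, hksnd, hcover⟩ :=
    pvFold_nbrs c hg hne hcG hck (pvNbrs c) (fun _ h => h) (T ++ C) seen dist C schar cmem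
      dchar hcseen
  rw [List.cons_append, pvBfs_cons, hfold]
  dsimp only
  have hucard : pvUcard row col (seen ++ ks) + ks.length = pvUcard row col seen :=
    pvUcard_append row col seen ks (fun m hm => ⟨(hksmem m hm).1, (hksmem m hm).2.2⟩) hksnd
  have hinv' : pvInv row col S k T (C ++ ks) (seen ++ ks) (pvGridIf row col S (seen ++ ks)) := by
    refine ⟨hg, hne, hk, fun m hm => tmem m (List.mem_cons_of_mem c hm), ?_, ?_, ?_, rfl⟩
    · intro m hm
      rcases List.mem_append.mp hm with hm | hm
      · exact cmem m hm
      · exact ⟨(hksmem m hm).1, (hksmem m hm).2.1⟩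
    · intro n hnG hval
      rcases cov n hnG hval with ⟨p, hp, hnp⟩ | hnC
      · rcases List.mem_cons.mp hp with rfl | hp
        · rcases hcover n hnp hnG hval with hmem | hmem
          · obtain ⟨_, hh⟩ := (schar n).mp hmem
            rcases hh with hle | hnC
            · omega
            · exact Or.inr (List.mem_append_left _ hnC)
          · exact Or.inr (List.mem_append_right _ hmem)
        · exact Or.inl ⟨p, hp, hnp⟩
      · exact Or.inr (List.mem_append_left _ hnC)
    · intro m
      constructor
      · intro hm
        rcases List.mem_append.mp hm with hm | hm
        · obtain ⟨hG, hh⟩ := (schar m).mp hm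
          exact ⟨hG, hh.imp id (List.mem_append_left _)⟩
        · exact ⟨(hksmem m hm).1, Or.inr (List.mem_append_right _ hm)⟩
      · rintro ⟨hG, hle | hmC⟩
        · exact List.mem_append_left _ ((schar m).mpr ⟨hG, Or.inl hle⟩)
        · rcases List.mem_append.mp hmC with hmC | hmC
          · exact List.mem_append_left _ ((schar m).mpr ⟨hG, Or.inr hmC⟩)
          · exact List.mem_append_right _ hmC
  have hfuel' : (T ++ (C ++ ks)).length + pvUcard row col (seen ++ ks) ≤ fuel := by
    simp only [List.length_append] at hfuel ⊢
    simp only [List.length_cons] at hfuel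
    omega
  have := IH k T (C ++ ks) (seen ++ ks) (pvGridIf row col S (seen ++ ks)) hinv' hfuel'
  rw [← List.append_assoc] at this
  exact this

lemma pvBfs_main {row col : Int} {S : List (Int × Int)} :
    ∀ (fuel : Nat) (k : Int) (T C : List (Int × Int)) (seen : PySem.Set (Int × Int))
      (dist : List (List Int)), pvInv row col S k T C seen dist →
      (T ++ C).length + pvUcard row col seen ≤ fuel →
      pvBfs row col fuel (T ++ C) seen dist = pvFinal row col S := by
  intro fuel
  induction fuel with
  | zero =>
    intro k T C seen dist hinv hfuel
    have h0 : (T ++ C).length = 0 := by omega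
    rcases List.append_eq_nil_iff.mp (List.length_eq_zero_iff.mp h0) with ⟨rfl, rfl⟩
    exact pvInv_terminal hinv
  | succ fuel ih =>
    intro k T C seen dist hinv hfuel
    cases hT : T with
    | cons c T' =>
      subst hT
      exact pvBfs_step fuel ih k c T' C seen dist hinv hfuel
    | nil =>
      subst hT
      have hinv' := pvInv_switch hinv
      cases hC : C with
      | nil =>
        subst hC
        exact pvInv_terminal hinv
      | cons c T' =>
        subst hC
        have := pvBfs_step fuel ih (k + 1) c T' [] seen dist (by simpa using hinv')
          (by simpa using hfuel)
        simpa using this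

lemma pvBfs_nil (row col : Int) (fuel : Nat) (seen : PySem.Set (Int × Int))
    (dist : List (List Int)) : pvBfs row col fuel [] seen dist = dist := by
  cases fuel <;> rfl

lemma pvSources_inG (matrix : List (List String)) (row col : Int) :
    ∀ s ∈ pvSources matrix row col, pvInG row col s := by
  intro s hs
  unfold pvSources at hs
  rcases List.mem_flatMap.mp hs with ⟨i, hi, hs2⟩
  rcases List.mem_map.mp hs2 with ⟨j, hj, rfl⟩
  rw [List.mem_filter] at hj
  have hi' := PySem.List.mem_pyRange_one.mp hi
  have hj' := PySem.List.mem_pyRange_one.mp hj.1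
  exact ⟨hi'.1, hi'.2, hj'.1, hj'.2⟩

lemma pvD_nil (c : Int × Int) : pvD [] c = 0 := by
  simp [pvD, PySem.List.minD_nil]

lemma pvReplicate_gridIf (row col : Int) (S seen : List (Int × Int))
    (h : ∀ m ∈ seen, pvD S m = 0) :
    List.replicate row.toNat (List.replicate col.toNat (0 : Int)) = pvGridIf row col S seen := by
  unfold pvGridIf
  apply List.ext_getElem
  · simp
  intro i h1 h2
  rw [List.getElem_replicate, List.getElem_map, List.getElem_range]
  apply List.ext_getElem
  · simp
  intro j hj1 hj2
  rw [List.getElem_replicate, List.getElem_map, List.getElem_range]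
  by_cases hmem : ((i : Int), (j : Int)) ∈ seen
  · rw [if_pos hmem, h _ hmem]
  · rw [if_neg hmem]

lemma pvReplicate_final (row col : Int) :
    List.replicate row.toNat (List.replicate col.toNat (0 : Int)) = pvFinal row col [] := by
  unfold pvFinal
  apply List.ext_getElem
  · simp
  intro i h1 h2
  rw [List.getElem_replicate, List.getElem_map, List.getElem_range]
  apply List.ext_getElem
  · simp
  intro j hj1 hj2
  rw [List.getElem_replicate, List.getElem_map, List.getElem_range, pvD_nil]

lemma pvB_grid (row col : Int) (S : List (Int × Int)) :
    (PySem.List.pyRange 0 row 1).map (fun i => (PySem.List.pyRange 0 col 1).map (fun j =>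
      PySem.List.minD (S.map (fun s => pvAbs (i - s.1) + pvAbs (j - s.2))) (fun x => x) 0))
    = pvFinal row col S := by
  rw [PySem.List.pyRange_one, PySem.List.pyRange_one]
  unfold pvFinal
  simp only [List.map_map, Int.sub_zero, zero_add]
  apply List.map_congr_left
  intro i _
  simp only [Function.comp]
  apply List.map_congr_left
  intro j _
  simp [pvD]

lemma pvA_grid (matrix : List (List String)) :
    pvBfs (matrix.length : Int) ((matrix.headI).length : Int)
      ((pvSources matrix (matrix.length : Int) ((matrix.headI).length : Int)).length
        + matrix.length * (matrix.headI).length)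
      (pvSources matrix (matrix.length : Int) ((matrix.headI).length : Int))
      (PySem.Set.ofList (pvSources matrix (matrix.length : Int) ((matrix.headI).length : Int)))
      (List.replicate matrix.length (List.replicate (matrix.headI).length (0 : Int)))
    = pvFinal (matrix.length : Int) ((matrix.headI).length : Int)
        (pvSources matrix (matrix.length : Int) ((matrix.headI).length : Int)) := by
  set row : Int := (matrix.length : Int) with hrow
  set col : Int := ((matrix.headI).length : Int) with hcol
  set S : List (Int × Int) := pvSources matrix row col with hS
  have hrowN : row.toNat = matrix.length := by rw [hrow]; exact Int.toNat_natCast _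
  have hcolN : col.toNat = (matrix.headI).length := by rw [hcol]; exact Int.toNat_natCast _
  by_cases hSe : S = []
  · rw [hSe, pvBfs_nil]
    have h := pvReplicate_final row col
    rw [hrowN, hcolN] at h
    exact h
  · have hg : ∀ s ∈ S, pvInG row col s := by
      rw [hS]; exact pvSources_inG matrix row col
    have hinv : pvInv row col S 0 S [] (PySem.Set.ofList S)
        (List.replicate matrix.length (List.replicate (matrix.headI).length (0 : Int))) := by
      refine ⟨hg, hSe, le_refl 0, ?_, by simp, ?_, ?_, ?_⟩
      · intro m hm
        exact ⟨hg m hm, (pvD_zero_iff S m hSe).mpr hm⟩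
      · intro n hnG hval
        have hpos : 0 < pvD S n := by omega
        obtain ⟨p, hpN, hpG, hpval⟩ := pvD_descend row col S n hg hSe hnG hpos
        have hpS : p ∈ S := (pvD_zero_iff S p hSe).mp (by omega)
        exact Or.inl ⟨p, hpS, (pvNbrs_symm n p).mp hpN⟩
      · intro m
        rw [PySem.Set.mem_ofList]
        constructor
        · intro hm
          exact ⟨hg m hm, Or.inl (le_of_eq ((pvD_zero_iff S m hSe).mpr hm))⟩
        · rintro ⟨hG, hle | hmC⟩
          · have hnn := pvD_nonneg S m hSe
            exact (pvD_zero_iff S m hSe).mp (by omega)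
          · exact (List.not_mem_nil hmC).elim
      · have h := pvReplicate_gridIf row col S (PySem.Set.ofList S)
          (fun m hm => (pvD_zero_iff S m hSe).mpr ((PySem.Set.mem_ofList S m).mp hm))
        rw [hrowN, hcolN] at h
        exact h
    have hfuel : (S ++ []).length + pvUcard row col (PySem.Set.ofList S)
        ≤ S.length + matrix.length * (matrix.headI).length := by
      have h1 := pvUcard_le row col (PySem.Set.ofList S)
      rw [hrowN, hcolN] at h1
      simp only [List.append_nil]
      omega
    have hmain := pvBfs_main (S.length + matrix.length * (matrix.headI).length) 0 S []
      (PySem.Set.ofList S)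
      (List.replicate matrix.length (List.replicate (matrix.headI).length (0 : Int)))
      hinv hfuel
    rw [List.append_nil] at hmain
    exact hmain

-- ===== VERDICT (by name: the statement is the Claim_ definition above) =====
theorem solution_spec : Claim_equal_solution := by
  unfold Claim_equal_solution Spec_solution
  intro matrix _hdom _hpre
  by_cases hemp : matrix.length = 0
  · simp only [solution, solution_alt, if_pos hemp]
  · simp only [solution, solution_alt, if_neg hemp]
    rw [pvA_grid matrix, pvB_grid]
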